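-- pv_equiv track=rewrite | github.com/SKEGGIA27/Tor-Vergata-Hackaton-2024 | 4/problema4.py | solve
-- ===== SOURCE A (Python) =====
-- def solve(wall: list[list[int]]) -> int:
--     """
--     Scrivi la tua soluzione qui.
--
--     :param wall: griglia che rappresenta le macchie di muffa sul muro
--     """
--     max_area = 0  # Inizializza l'area massima a 0
--
--     # Funzione per eseguire una DFS e trovare l'area di 1 contigua
--     def DFS(r, c):
--         # Verifica i limiti della griglia e se il valore è 0 o già visitato
--         if r < 0 or r >= len(wall) or c < 0 or c >= len(wall[0]) or wall[r][c] == 0: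
--             return 0
--         # Imposta il punto corrente a 0 per segnalarlo come visitato
--         wall[r][c] = 0
--         # Calcola l'area corrente e somma le aree adiacenti
--         area = 1 + DFS(r+1, c) + DFS(r-1, c) + DFS(r, c+1) + DFS(r, c-1)
--         return area
--
--     # Scansiona la griglia per trovare l'area massima
--     for r in range(len(wall)):
--         for c in range(len(wall[0])):
--             # Se il punto corrente è 1, esegui una DFS per trovare l'area adiacente
--             if wall[r][c] == 1:
--                 max_area = max(max_area, DFS(r, c))
--
--     return max_area
-- ===== SOURCE B (Python) =====
-- def solve(wall: list[list[int]]) -> int: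
--     """Iterative flood fill with an explicit stack instead of recursive DFS."""
--     max_area = 0
--     for r in range(len(wall)):
--         for c in range(len(wall[0])):
--             if wall[r][c] == 1:
--                 stack = [(r, c)]
--                 area = 0
--                 while stack:
--                     rr, cc = stack.pop()
--                     if rr < 0 or rr >= len(wall) or cc < 0 or cc >= len(wall[0]) or wall[rr][cc] == 0:
--                         continue
--                     wall[rr][cc] = 0
--                     area += 1
--                     stack.append((rr, cc - 1))
--                     stack.append((rr, cc + 1))
--                     stack.append((rr - 1, cc))
--                     stack.append((rr + 1, cc))
--                 max_area = max(max_area, area)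
--     return max_area
-- ===== Notes on version B (the rewrite author's own statement) =====
-- stated objective: alternative
-- what changed: The recursive DFS helper is replaced by an iterative flood fill that pops cells from an explicit stack, marking each cell zero when popped, so the implicit call stack disappears.
import Mathlib
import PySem

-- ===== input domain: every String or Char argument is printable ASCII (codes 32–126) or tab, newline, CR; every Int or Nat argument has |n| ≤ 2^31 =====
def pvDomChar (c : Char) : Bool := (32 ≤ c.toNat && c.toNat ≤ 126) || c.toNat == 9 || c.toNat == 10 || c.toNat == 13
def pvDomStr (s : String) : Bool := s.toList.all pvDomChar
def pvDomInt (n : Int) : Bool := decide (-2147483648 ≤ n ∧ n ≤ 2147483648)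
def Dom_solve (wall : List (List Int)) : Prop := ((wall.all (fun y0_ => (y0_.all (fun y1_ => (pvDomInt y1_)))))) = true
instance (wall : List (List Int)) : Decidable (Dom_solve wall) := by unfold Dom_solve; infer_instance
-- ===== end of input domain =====

-- B replaces A's recursive DFS by an iterative flood fill with an explicit stack (same scan, same
-- return value); both A and B mutate `wall` in place identically (zeroing visited cells) — the
-- equivalence proved here is about the return value.

-- ===== PORT A =====
-- shared grid primitives (both Pythons use the very same guard / read / write expressions):
-- wall[r][c] read with a default; exact whenever the Python access does not raise (indices are
-- guarded to be ≥ 0 and in range before they matter, as in the Python sources).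
def getv (g : List (List Int)) (r c : Int) : Int :=
  (g.getD r.toNat []).getD c.toNat 0

-- wall[r][c] = 0 (only ever executed under the guard 0 ≤ r < len(wall), so toNat is exact)
def set0 (g : List (List Int)) (r c : Int) : List (List Int) :=
  g.modify r.toNat (fun row => row.set c.toNat 0)

-- the common guard: r < 0 or r >= len(wall) or c < 0 or c >= len(wall[0]) or wall[r][c] == 0
def bad (g : List (List Int)) (r c : Int) : Bool :=
  decide (r < 0) || decide ((g.length : Int) ≤ r) || decide (c < 0) ||
    decide (((g.headD []).length : Int) ≤ c) || (getv g r c == 0)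

-- number of nonzero cells: totality fuel for A's DFS and termination measure for B's loop
def countNZ (g : List (List Int)) : Nat :=
  (g.map (fun row => row.countP (fun x => x != 0))).sum

-- termination facts cited by the ports (loopB's decreasing_by / dfsA's fuel discipline)
lemma modify_cons_zero (f : List Int → List Int) (a : List Int) (l : List (List Int)) :
    (a :: l).modify 0 f = f a :: l := rfl

lemma modify_cons_succ (f : List Int → List Int) (a : List Int) (l : List (List Int)) (n : Nat) :
    (a :: l).modify (n + 1) f = a :: l.modify n f := rfl

lemma countP_set_zero_lt (row : List Int) (m : Nat) (h : row.getD m 0 ≠ 0) :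
    (row.set m 0).countP (fun x => x != 0) < row.countP (fun x => x != 0) := by
  induction row generalizing m with
  | nil => simp at h
  | cons a t ih =>
    cases m with
    | zero =>
      simp only [List.getD, List.getElem?_cons_zero, Option.getD_some] at h
      simp [h]
    | succ m =>
      simp only [List.getD, List.getElem?_cons_succ] at h
      have := ih m h
      simp only [List.set_cons_succ, List.countP_cons]
      omega

lemma countNZ_set0_lt (g : List (List Int)) (r c : Int) (h : getv g r c ≠ 0) :
    countNZ (set0 g r c) < countNZ g := by
  unfold getv set0 at *
  generalize r.toNat = n at *
  induction g generalizing n with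
  | nil => simp at h
  | cons row t ih =>
    cases n with
    | zero =>
      simp only [List.getD, List.getElem?_cons_zero, Option.getD_some] at h
      have := countP_set_zero_lt row c.toNat h
      simp only [modify_cons_zero, countNZ, List.map_cons, List.sum_cons]
      omega
    | succ n =>
      simp only [List.getD, List.getElem?_cons_succ] at h
      have := ih n h
      simp only [modify_cons_succ, countNZ, List.map_cons, List.sum_cons] at *
      omega

-- A's recursive DFS; `fuel` is a pure totality guard (the fuel-0 branch is unreachable whenever
-- fuel ≥ countNZ g, which is how solve calls it)
def dfsA : Nat → List (List Int) → Int → Int → Int × List (List Int)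
  | fuel, g, r, c =>
    if bad g r c then (0, g)
    else
      match fuel with
      | 0 => (0, g)
      | fuel' + 1 =>
        let p1 := dfsA fuel' (set0 g r c) (r + 1) c
        let p2 := dfsA fuel' p1.2 (r - 1) c
        let p3 := dfsA fuel' p2.2 r (c + 1)
        let p4 := dfsA fuel' p3.2 r (c - 1)
        (1 + p1.1 + p2.1 + p3.1 + p4.1, p4.2)

-- the scan: for c in range(len(wall[0])): if wall[r][c] == 1: max_area = max(max_area, DFS(r, c))
def cellA (r : Int) (st : Int × List (List Int)) (c : Int) : Int × List (List Int) :=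
  if getv st.2 r c == 1 then
    let p := dfsA (countNZ st.2) st.2 r c
    (max st.1 p.1, p.2)
  else st

def rowA (st : Int × List (List Int)) (r : Int) : Int × List (List Int) :=
  (PySem.List.pyRange 0 ((st.2.headD []).length : Int) 1).foldl (cellA r) st

def solve (wall : List (List Int)) : Int :=
  ((PySem.List.pyRange 0 (wall.length : Int) 1).foldl rowA ((0 : Int), wall)).1

-- ===== PORT B =====
-- B's while-loop over the explicit stack (head of the list = top of the Python stack; the four
-- appends put (r+1, c) on top, so it is popped first)
def loopB (g : List (List Int)) (st : List (Int × Int)) (area : Int) : Int × List (List Int) :=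
  match st with
  | [] => (area, g)
  | (r, c) :: rest =>
    if h : bad g r c then loopB g rest area
    else loopB (set0 g r c)
        ((r + 1, c) :: (r - 1, c) :: (r, c + 1) :: (r, c - 1) :: rest) (area + 1)
termination_by 5 * countNZ g + st.length
decreasing_by
  · simp only [List.length_cons]; omega
  · have hnz : getv g r c ≠ 0 := by
      simp only [bad, Bool.or_eq_true, decide_eq_true_eq, beq_iff_eq] at h
      intro hz; exact h (Or.inr hz)
    have := countNZ_set0_lt g r c hnz
    simp only [List.length_cons]; omega

def cellB (r : Int) (st : Int × List (List Int)) (c : Int) : Int × List (List Int) :=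
  if getv st.2 r c == 1 then
    let p := loopB st.2 [(r, c)] 0
    (max st.1 p.1, p.2)
  else st

def rowB (st : Int × List (List Int)) (r : Int) : Int × List (List Int) :=
  (PySem.List.pyRange 0 ((st.2.headD []).length : Int) 1).foldl (cellB r) st

def solve_alt (wall : List (List Int)) : Int :=
  ((PySem.List.pyRange 0 (wall.length : Int) 1).foldl rowB ((0 : Int), wall)).1

-- ===== PRECONDITION & SPEC =====
-- Pre_ excludes exactly the inputs on which the Python A raises IndexError: the scan reads
-- wall[r][c] for every c < len(wall[0]), so A returns iff no row is shorter than row 0.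
def Pre_solve (wall : List (List Int)) : Prop :=
  ∀ row ∈ wall, (wall.headD []).length ≤ row.length
instance (wall : List (List Int)) : Decidable (Pre_solve wall) := by
  unfold Pre_solve; infer_instance

def pvWitness_solve : List (List Int) := [[1, 0], [1, 1]]

def Spec_solve (wall : List (List Int)) (out : Int) : Prop := out = solve_alt wall
instance (wall : List (List Int)) (out : Int) : Decidable (Spec_solve wall out) := by
  unfold Spec_solve; infer_instance

-- ===== CLAIM (what is proved, stated in full; the proofs are below) =====
def Claim_equal_solve : Prop :=
  ∀ (wall : List (List Int)), Dom_solve wall → Pre_solve wall → Spec_solve wall (solve wall)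

-- ===== LEMMAS AND PROOFS =====

-- zeroing never increases the nonzero count
lemma countP_set_zero_le (row : List Int) (m : Nat) :
    (row.set m 0).countP (fun x => x != 0) ≤ row.countP (fun x => x != 0) := by
  induction row generalizing m with
  | nil => simp
  | cons a t ih =>
    cases m with
    | zero => simp [List.countP_cons]
    | succ m =>
      have := ih m
      simp only [List.set_cons_succ, List.countP_cons]
      omega

lemma countNZ_set0_le (g : List (List Int)) (r c : Int) :
    countNZ (set0 g r c) ≤ countNZ g := by
  unfold set0
  generalize r.toNat = n
  induction g generalizing n with
  | nil => simp [countNZ]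
  | cons row t ih =>
    cases n with
    | zero =>
      have := countP_set_zero_le row c.toNat
      simp only [modify_cons_zero, countNZ, List.map_cons, List.sum_cons]
      omega
    | succ n =>
      have := ih n
      simp only [modify_cons_succ, countNZ, List.map_cons, List.sum_cons] at *
      omega

-- A's DFS never increases the nonzero count
lemma dfsA_count_le (fuel : Nat) :
    ∀ (g : List (List Int)) (r c : Int), countNZ (dfsA fuel g r c).2 ≤ countNZ g := by
  induction fuel with
  | zero =>
    intro g r c
    rw [dfsA]
    split
    all_goals simp
  | succ fuel ih =>
    intro g r c
    by_cases hb : bad g r c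
    · rw [dfsA]; simp [hb]
    · rw [dfsA]
      simp only [hb, if_false, Bool.false_eq_true]
      have h0 := countNZ_set0_le g r c
      have h1 := ih (set0 g r c) (r + 1) c
      have h2 := ih (dfsA fuel (set0 g r c) (r + 1) c).2 (r - 1) c
      have h3 := ih (dfsA fuel (dfsA fuel (set0 g r c) (r + 1) c).2 (r - 1) c).2 r (c + 1)
      have h4 := ih (dfsA fuel (dfsA fuel (dfsA fuel (set0 g r c) (r + 1) c).2 (r - 1) c).2 r (c + 1)).2 r (c - 1)
      omega

lemma bad_false_getv_ne (g : List (List Int)) (r c : Int) (h : ¬ bad g r c) :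
    getv g r c ≠ 0 := by
  simp only [bad, Bool.or_eq_true, decide_eq_true_eq, beq_iff_eq] at h
  intro hz; exact h (Or.inr hz)

-- THE SIMULATION: running B's stack loop from a seed equals running A's DFS there and
-- continuing with the rest of the stack — B is A with the call stack made explicit.
lemma sim (k : Nat) :
    ∀ (g : List (List Int)), countNZ g ≤ k →
      ∀ (n : Nat), countNZ g ≤ n → ∀ (r c : Int) (st : List (Int × Int)) (a : Int),
        loopB g ((r, c) :: st) a = loopB (dfsA n g r c).2 st (a + (dfsA n g r c).1) := by
  induction k with
  | zero =>
    intro g hk n _ r c st a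
    have hb : bad g r c := by
      by_contra hb
      have := countNZ_set0_lt g r c (bad_false_getv_ne g r c hb)
      omega
    rw [loopB, dfsA.eq_def]
    simp [hb]
  | succ k ih =>
    intro g hk n hn r c st a
    by_cases hb : bad g r c
    · rw [loopB, dfsA.eq_def]; simp [hb]
    · have hnz := bad_false_getv_ne g r c hb
      have hlt := countNZ_set0_lt g r c hnz
      obtain ⟨m, rfl⟩ : ∃ m, n = m + 1 := ⟨n - 1, by omega⟩
      rcases h1 : dfsA m (set0 g r c) (r + 1) c with ⟨a1, g1⟩
      rcases h2 : dfsA m g1 (r - 1) c with ⟨a2, g2⟩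
      rcases h3 : dfsA m g2 r (c + 1) with ⟨a3, g3⟩
      rcases h4 : dfsA m g3 r (c - 1) with ⟨a4, g4⟩
      have hc0 : countNZ (set0 g r c) ≤ k := by omega
      have hc0m : countNZ (set0 g r c) ≤ m := by omega
      have hc1 : countNZ g1 ≤ countNZ (set0 g r c) := by
        have := dfsA_count_le m (set0 g r c) (r + 1) c; rw [h1] at this; exact this
      have hc2 : countNZ g2 ≤ countNZ g1 := by
        have := dfsA_count_le m g1 (r - 1) c; rw [h2] at this; exact this
      have hc3 : countNZ g3 ≤ countNZ g2 := by
        have := dfsA_count_le m g2 r (c + 1); rw [h3] at this; exact this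
      have lhs : loopB g ((r, c) :: st) a
          = loopB (set0 g r c) ((r + 1, c) :: (r - 1, c) :: (r, c + 1) :: (r, c - 1) :: st) (a + 1) := by
        rw [loopB]; simp [hb]
      rw [lhs]
      rw [ih (set0 g r c) hc0 m hc0m (r + 1) c _ (a + 1), h1]
      rw [ih g1 (by omega) m (by omega) (r - 1) c _ _, h2]
      rw [ih g2 (by omega) m (by omega) r (c + 1) _ _, h3]
      rw [ih g3 (by omega) m (by omega) r (c - 1) _ _, h4]
      have rhs : dfsA (m + 1) g r c = (1 + a1 + a2 + a3 + a4, g4) := by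
        rw [dfsA]
        simp only [hb, if_false, Bool.false_eq_true, h1, h2, h3, h4]
      rw [rhs]
      simp only []
      congr 1
      ring

lemma flood_eq (g : List (List Int)) (r c : Int) :
    loopB g [(r, c)] 0 = dfsA (countNZ g) g r c := by
  have := sim (countNZ g) g le_rfl (countNZ g) le_rfl r c [] 0
  rw [this, loopB]
  simp

lemma cell_eq : cellA = cellB := by
  funext r st c
  unfold cellA cellB
  rw [flood_eq]

lemma row_eq : rowA = rowB := by
  funext st r
  unfold rowA rowB
  rw [cell_eq]

-- ===== VERDICT (by name: the statement is the Claim_ definition above) =====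
theorem solve_spec : Claim_equal_solve := by
  intro wall _ _
  unfold Spec_solve solve solve_alt
  rw [row_eq]
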